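-- pv_equiv track=rewrite | github.com/kszx11/harry-potter | src/hogwarts_game/engine/game.py | _normalize_npc_reply
-- ===== SOURCE A (Python) =====
-- def _normalize_npc_reply(npc_name: str, reply: str) -> str:
--     cleaned = reply.strip()
--     lowered = cleaned.lower()
--     name_lower = npc_name.lower()
--     for prefix in (
--         f"{name_lower}:",
--         f"{name_lower} says:",
--         f"{name_lower} said:",
--         f"{name_lower},",
--         f"{name_lower} ",
--     ):
--         if lowered.startswith(prefix):
--             return cleaned[len(prefix):].strip()
--     return cleaned
-- ===== SOURCE B (Python) =====
-- def _normalize_npc_reply(npc_name: str, reply: str) -> str: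
--     # B: single character-by-character scan that consumes the name case-insensitively,
--     # then computes the cut length arithmetically from the next character (no loop over
--     # five name+separator prefixes).
--     cleaned = reply.strip()
--     i = 0
--     for ch in npc_name:
--         if i >= len(cleaned) or cleaned[i].lower() != ch.lower():
--             return cleaned
--         i += 1
--     rest = cleaned[i:]
--     nxt = rest[:1].lower()
--     if nxt not in (":", ",", " "):
--         return cleaned
--     cut = 6 if nxt == " " and rest[1:6].lower() in ("says:", "said:") else 1
--     return rest[cut:].strip()
-- ===== Notes on version B (the rewrite author's own statement) =====
-- stated objective: alternative
-- what changed: B replaces A's loop over five precomputed name+separator prefix strings by a single character-by-character scan that consumes the NPC name case-insensitively and then computes the cut length arithmetically from the one character following the name (with a single five-character lookahead for ' says:'/' said:'), instead of repeatedly matching full prefixes against the whole lowered string.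
import Mathlib
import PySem

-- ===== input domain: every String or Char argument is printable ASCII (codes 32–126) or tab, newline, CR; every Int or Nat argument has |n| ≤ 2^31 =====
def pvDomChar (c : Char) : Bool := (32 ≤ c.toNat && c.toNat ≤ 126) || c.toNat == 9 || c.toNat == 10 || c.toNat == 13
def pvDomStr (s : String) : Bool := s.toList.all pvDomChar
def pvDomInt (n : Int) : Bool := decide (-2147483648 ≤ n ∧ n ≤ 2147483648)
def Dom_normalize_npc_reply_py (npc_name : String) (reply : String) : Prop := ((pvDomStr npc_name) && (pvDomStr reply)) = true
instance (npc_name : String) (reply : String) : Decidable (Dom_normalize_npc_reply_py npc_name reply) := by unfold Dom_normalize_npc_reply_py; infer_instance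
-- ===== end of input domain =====

-- B replaces the loop over five name+separator prefixes by a single character-by-character
-- scan that consumes the name case-insensitively and then computes the cut length
-- arithmetically from the next character (alternative decomposition).


-- ===== PORT A =====
-- the for-loop over the five prefixes
def pvGoA (cleaned lowered : String) : List String → String
  | [] => cleaned
  | p :: rest =>
    if PySem.Str.startswith lowered p then
      PySem.Str.strip (PySem.Str.slice cleaned (some (PySem.Str.len p)) none)
    else pvGoA cleaned lowered rest

def normalize_npc_reply_py (npc_name : String) (reply : String) : String :=
  let cleaned := PySem.Str.strip reply
  let lowered := PySem.Str.lower cleaned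
  let name_lower := PySem.Str.lower npc_name
  pvGoA cleaned lowered
    [name_lower ++ ":", name_lower ++ " says:", name_lower ++ " said:",
     name_lower ++ ",", name_lower ++ " "]

-- ===== PORT B =====
-- the 'for ch in npc_name' scan: consume the name case-insensitively, char by char;
-- none = an early 'return cleaned', some rest = cleaned[i:] after the loop
def pvConsumeName : List Char → List Char → Option (List Char)
  | [], cs => some cs
  | _ :: _, [] => none
  | ch :: name, c :: cs =>
    if PySem.Chars.lowerChar c = PySem.Chars.lowerChar ch then pvConsumeName name cs
    else none

def normalize_npc_reply_py_alt (npc_name : String) (reply : String) : String :=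
  let cleaned := PySem.Str.strip reply
  match pvConsumeName npc_name.toList cleaned.toList with
  | none => cleaned
  | some rest =>
    let nxt := PySem.Chars.lower (rest.take 1)          -- rest[:1].lower()
    if nxt = [':'] ∨ nxt = [','] ∨ nxt = [' '] then
      let cut : Nat :=
        if nxt = [' '] ∧ (PySem.Chars.lower ((rest.drop 1).take 5) = ['s','a','y','s',':'] ∨
                          PySem.Chars.lower ((rest.drop 1).take 5) = ['s','a','i','d',':'])
        then 6 else 1
      String.ofList (PySem.Chars.strip (rest.drop cut)) -- rest[cut:].strip()
    else cleaned

-- ===== PRECONDITION & SPEC =====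
def Spec_normalize_npc_reply_py (npc_name : String) (reply : String) (out : String) : Prop := out = normalize_npc_reply_py_alt npc_name reply
instance (npc_name : String) (reply : String) (out : String) : Decidable (Spec_normalize_npc_reply_py npc_name reply out) := by unfold Spec_normalize_npc_reply_py; infer_instance

-- ===== CLAIM (what is proved, stated in full; the proofs are below) =====
def Claim_equal_normalize_npc_reply_py : Prop := ∀ (npc_name : String) (reply : String), Dom_normalize_npc_reply_py npc_name reply → Spec_normalize_npc_reply_py npc_name reply (normalize_npc_reply_py npc_name reply)

-- ===== LEMMAS AND PROOFS =====

-- B's name-consuming scan, characterized: it succeeds exactly when the lowered name is a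
-- prefix of the lowered string, and then returns the un-lowered remainder
theorem pv_consume_eq (N : List Char) : ∀ (L : List Char),
    pvConsumeName N L =
      if N.map PySem.Chars.lowerChar <+: L.map PySem.Chars.lowerChar
      then some (L.drop N.length) else none := by
  induction N with
  | nil => intro L; simp [pvConsumeName]
  | cons ch name ih =>
    intro L
    cases L with
    | nil => simp [pvConsumeName]
    | cons c cs =>
      simp only [pvConsumeName, List.map_cons, List.cons_prefix_cons, ih cs,
        List.length_cons, List.drop_succ_cons]
      by_cases h : PySem.Chars.lowerChar c = PySem.Chars.lowerChar ch
      · simp [h]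
      · simp [h]
        exact fun hh => absurd hh.symm h

-- (a ++ b) is a prefix of l iff a is and b is a prefix of what remains after a
theorem pv_prefix_append_iff {α : Type} (a b l : List α) :
    a ++ b <+: l ↔ (a <+: l ∧ b <+: l.drop a.length) := by
  constructor
  · rintro ⟨t, rfl⟩
    refine ⟨⟨b ++ t, by simp⟩, ⟨t, by simp⟩⟩
  · rintro ⟨⟨t1, h1⟩, ⟨t2, h2⟩⟩
    refine ⟨t2, ?_⟩
    have ht : List.drop a.length l = t1 := by rw [← h1]; simp
    rw [List.append_assoc, h2, ht, h1]

-- the empty prefix always matches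
theorem pv_sw_nil (l : List Char) : PySem.Chars.startswith l [] = true := by
  simp [PySem.Chars.startswith_iff]

-- multi-character prefix test split at the first character
theorem pv_sw_cons (d : Char) (l : List Char) (x : Char) (tl : List Char) :
    PySem.Chars.startswith (d :: l) (x :: tl) =
      (decide (d = x) && PySem.Chars.startswith l tl) := by
  rw [Bool.eq_iff_iff]
  simp only [PySem.Chars.startswith_iff, List.cons_prefix_cons, Bool.and_eq_true,
    decide_eq_true_eq]
  constructor
  · exact fun h => ⟨h.1.symm, h.2⟩
  · exact fun h => ⟨h.1.symm, h.2⟩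

-- B's slice comparison rest[1:6].lower() == tl is A's startswith test on the lowered tail
theorem pv_take_eq_iff_sw (l tl : List Char) (h : tl.length = 5) :
    l.take 5 = tl ↔ PySem.Chars.startswith l tl = true := by
  rw [PySem.Chars.startswith_iff, List.prefix_iff_eq_take, h]
  exact eq_comm

-- the five-branch dispatch of A equals B's nxt/cut computation, for any branch result X
theorem pv_branch_core (rest : List Char) (cl : String) (X : Nat → String) :
    (if PySem.Chars.startswith (PySem.Chars.lower rest) [':'] then X 1
     else if PySem.Chars.startswith (PySem.Chars.lower rest) [' ','s','a','y','s',':'] then X 6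
     else if PySem.Chars.startswith (PySem.Chars.lower rest) [' ','s','a','i','d',':'] then X 6
     else if PySem.Chars.startswith (PySem.Chars.lower rest) [','] then X 1
     else if PySem.Chars.startswith (PySem.Chars.lower rest) [' '] then X 1
     else cl) =
    (if PySem.Chars.lower (rest.take 1) = [':'] ∨ PySem.Chars.lower (rest.take 1) = [','] ∨
        PySem.Chars.lower (rest.take 1) = [' '] then
       X (if PySem.Chars.lower (rest.take 1) = [' '] ∧
             (PySem.Chars.lower ((rest.drop 1).take 5) = ['s','a','y','s',':'] ∨
              PySem.Chars.lower ((rest.drop 1).take 5) = ['s','a','i','d',':'])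
          then 6 else 1)
     else cl) := by
  simp only [show PySem.Chars.lower = List.map PySem.Chars.lowerChar from rfl]
  cases rest with
  | nil => simp [PySem.Chars.startswith_iff]
  | cons c cs =>
    simp only [List.map_cons, List.take_succ_cons, List.take_zero, List.drop_succ_cons,
      List.drop_zero, pv_sw_cons, pv_sw_nil, Bool.and_true, List.map_nil]
    by_cases h1 : PySem.Chars.lowerChar c = ':'
    · simp [h1]
    · by_cases h2 : PySem.Chars.lowerChar c = ','
      · simp [h2]
      · by_cases h3 : PySem.Chars.lowerChar c = ' '
        · by_cases h4 : PySem.Chars.startswith (cs.map PySem.Chars.lowerChar) ['s','a','y','s',':'] = true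
          · simp [h3, h4, (pv_take_eq_iff_sw (cs.map PySem.Chars.lowerChar) _ rfl).mpr h4]
          · have n4 : (cs.map PySem.Chars.lowerChar).take 5 ≠ ['s','a','y','s',':'] :=
              fun hh => h4 ((pv_take_eq_iff_sw (cs.map PySem.Chars.lowerChar) _ rfl).mp hh)
            by_cases h5 : PySem.Chars.startswith (cs.map PySem.Chars.lowerChar) ['s','a','i','d',':'] = true
            · simp [h3, h4, h5, (pv_take_eq_iff_sw (cs.map PySem.Chars.lowerChar) _ rfl).mpr h5]
            · have n5 : (cs.map PySem.Chars.lowerChar).take 5 ≠ ['s','a','i','d',':'] :=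
                fun hh => h5 ((pv_take_eq_iff_sw (cs.map PySem.Chars.lowerChar) _ rfl).mp hh)
              simp [h3, h4, h5, n4, n5]
        · simp [h1, h2, h3]

-- startswith on a concatenated prefix, list level
theorem pv_swc_append (s p q : List Char) :
    PySem.Chars.startswith s (p ++ q) =
      (PySem.Chars.startswith s p && PySem.Chars.startswith (s.drop p.length) q) := by
  rw [Bool.eq_iff_iff]
  simp [PySem.Chars.startswith_iff, pv_prefix_append_iff]

-- lowering commutes with drop
theorem pv_lower_drop (l : List Char) (n : Nat) :
    (PySem.Chars.lower l).drop n = PySem.Chars.lower (l.drop n) := by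
  simp [PySem.Chars.lower, List.map_drop]

-- A's returned 'cleaned[len(prefix):].strip()', rewritten through the list level (cut 1)
theorem pv_val1 (r : String) (n : Nat) :
    PySem.Str.strip (PySem.Str.slice (PySem.Str.strip r) (some ((n : Int) + 1)) none) =
      String.ofList (PySem.Chars.strip (List.drop (n + 1) (PySem.Chars.strip r.toList))) := by
  simp only [PySem.Str.strip, PySem.Str.toList_slice, PySem.Chars.slice_eq_listSlice]
  rw [PySem.List.slice_from _ (by positivity), show ((n : Int) + 1).toNat = n + 1 by omega]
  simp

-- the same for cut 6
theorem pv_val6 (r : String) (n : Nat) :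
    PySem.Str.strip (PySem.Str.slice (PySem.Str.strip r) (some ((n : Int) + 6)) none) =
      String.ofList (PySem.Chars.strip (List.drop (n + 6) (PySem.Chars.strip r.toList))) := by
  simp only [PySem.Str.strip, PySem.Str.toList_slice, PySem.Chars.slice_eq_listSlice]
  rw [PySem.List.slice_from _ (by positivity), show ((n : Int) + 6).toNat = n + 6 by omega]
  simp

-- ===== VERDICT (by name: the statement is the Claim_ definition above) =====
theorem normalize_npc_reply_py_spec : Claim_equal_normalize_npc_reply_py := by
  intro npc_name reply _
  show normalize_npc_reply_py npc_name reply = normalize_npc_reply_py_alt npc_name reply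
  simp only [normalize_npc_reply_py, normalize_npc_reply_py_alt, pv_consume_eq]
  by_cases hpre : npc_name.toList.map PySem.Chars.lowerChar <+:
      (PySem.Str.strip reply).toList.map PySem.Chars.lowerChar
  · rw [if_pos hpre]
    have hnameC : PySem.Chars.startswith (PySem.Chars.lower (PySem.Chars.strip reply.toList))
        (PySem.Chars.lower npc_name.toList) = true := by
      rw [PySem.Chars.startswith_iff]
      simpa [PySem.Chars.lower, ← PySem.Str.toList_strip] using hpre
    simp only [pvGoA]
    simp [pv_swc_append, hnameC, pv_lower_drop]
    have hlen : (PySem.Chars.lower npc_name.toList).length = npc_name.length := by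
      simp [PySem.Chars.lower]
    rw [hlen]
    simp only [pv_val1, pv_val6]
    rw [pv_branch_core (List.drop npc_name.length (PySem.Chars.strip reply.toList))
        (PySem.Str.strip reply)
        (fun k => String.ofList (PySem.Chars.strip
          (List.drop (npc_name.length + k) (PySem.Chars.strip reply.toList))))]
    simp [List.drop_drop]
  · rw [if_neg hpre]
    have hnameC : PySem.Chars.startswith (PySem.Chars.lower (PySem.Chars.strip reply.toList))
        (PySem.Chars.lower npc_name.toList) = false := by
      rw [Bool.eq_false_iff]
      intro h
      rw [PySem.Chars.startswith_iff] at h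
      exact hpre (by simpa [PySem.Chars.lower, ← PySem.Str.toList_strip] using h)
    simp [pvGoA, pv_swc_append, hnameC]
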